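-- pv_equiv track=rewrite | github.com/jaesung0804/programmers | kakao/1단계/성격 유형 검사하기.py | solution
-- ===== SOURCE A (Python) =====
-- def solution(survey, choices):
--     answer = ''
--     type_list = ["R","T","C","F","J","M","A","N"]
--     score_dict = {x:0 for x in type_list}
--
--     for s,c in zip(survey, choices):
--         if c >= 4:
--             score_dict[s[1]] += (c-4)
--         else: score_dict[s[0]] += (4-c)
--
--     for i in range(4):
--         if score_dict[type_list[2*i]] >= score_dict[type_list[2*i + 1]]:
--             answer += type_list[2*i]
--         else: answer += type_list[2*i + 1]
--
--     return answer
-- ===== SOURCE B (Python) =====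
-- _PAIRS = ["RT", "CF", "JM", "AN"]
--
--
-- def _chosen(s, c):
--     return (s[1], c - 4) if c >= 4 else (s[0], 4 - c)
--
--
-- def solution(survey, choices):
--     answer = ''
--     for pos, neg in _PAIRS:
--         net = 0
--         for letter, w in map(_chosen, survey, choices):
--             if letter == pos:
--                 net += w
--             elif letter == neg:
--                 net -= w
--         answer += pos if net >= 0 else neg
--     return answer
-- ===== Notes on version B (the rewrite author's own statement) =====
-- stated objective: alternative
-- what changed: Drops A's 8-key score dictionary and single accumulating pass: B loops over the 4 personality axes and for each axis makes an independent scan of the answers, summing signed contributions of the chosen letter, then picks the letter by the sign of that net sum.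
import Mathlib
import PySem

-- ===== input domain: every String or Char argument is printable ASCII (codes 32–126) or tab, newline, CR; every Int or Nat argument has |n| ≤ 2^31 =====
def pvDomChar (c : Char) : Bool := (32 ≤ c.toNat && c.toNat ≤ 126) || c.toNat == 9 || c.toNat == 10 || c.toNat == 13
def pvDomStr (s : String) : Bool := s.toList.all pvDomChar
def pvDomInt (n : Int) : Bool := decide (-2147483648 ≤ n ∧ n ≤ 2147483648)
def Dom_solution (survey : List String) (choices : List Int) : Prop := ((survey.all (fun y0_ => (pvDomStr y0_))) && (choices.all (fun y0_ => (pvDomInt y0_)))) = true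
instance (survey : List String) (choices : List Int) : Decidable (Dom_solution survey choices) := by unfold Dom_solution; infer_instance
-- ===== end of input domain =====

-- B drops A's 8-key score dictionary and single pass: it scans the answers once per axis, summing signed contributions; same cost, different traversal.

-- ===== PORT A =====
def typeListA : List Char := ['R', 'T', 'C', 'F', 'J', 'M', 'A', 'N']

-- one iteration of A's scoring loop; the .getD ' ' only fires where Python raises IndexError (excluded by Pre_)
def solAStep (d : PySem.Dict Char Int) (p : String × Int) : PySem.Dict Char Int :=
  if p.2 ≥ 4 then d.modify ((PySem.Str.pyGet? p.1 1).getD ' ') 0 (· + (p.2 - 4))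
  else d.modify ((PySem.Str.pyGet? p.1 0).getD ' ') 0 (· + (4 - p.2))

def solution (survey : List String) (choices : List Int) : String :=
  let d0 : PySem.Dict Char Int := typeListA.foldl (fun d x => d.insert x 0) PySem.Dict.empty
  let d := (survey.zip choices).foldl solAStep d0
  let ans := (PySem.List.pyRange 0 4 1).foldl (fun (ans : List Char) i =>
    let a := (PySem.List.pyGet? typeListA (2 * i)).getD ' '
    let b := (PySem.List.pyGet? typeListA (2 * i + 1)).getD ' '
    if d.getD a 0 ≥ d.getD b 0 then ans ++ [a] else ans ++ [b]) []
  String.mk ans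

-- ===== PORT B =====
def pvPairsB : List (Char × Char) := [('R', 'T'), ('C', 'F'), ('J', 'M'), ('A', 'N')]

-- Source B's _chosen(s, c); the .getD ' ' only fires where Python raises IndexError (excluded by Pre_)
def chosenB (p : String × Int) : Char × Int :=
  if p.2 ≥ 4 then ((PySem.Str.pyGet? p.1 1).getD ' ', p.2 - 4)
  else ((PySem.Str.pyGet? p.1 0).getD ' ', 4 - p.2)

-- one iteration of Source B's inner per-axis scan
def netStepB (pos neg : Char) (net : Int) (p : String × Int) : Int :=
  let lw := chosenB p
  if lw.1 = pos then net + lw.2 else if lw.1 = neg then net - lw.2 else net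

def solution_alt (survey : List String) (choices : List Int) : String :=
  pvPairsB.foldl (fun ans q =>
    let net := (survey.zip choices).foldl (netStepB q.1 q.2) 0
    ans.push (if net ≥ 0 then q.1 else q.2)) ""

-- ===== PRECONDITION & SPEC =====
-- Pre_ excludes exactly the inputs where A raises: a zipped pair whose accessed character
-- (s[1] when c >= 4, else s[0]) is missing (IndexError) or not one of the 8 type letters (KeyError).
def Pre_solution (survey : List String) (choices : List Int) : Prop :=
  ∀ p ∈ survey.zip choices,
    (if p.2 ≥ 4 then PySem.Str.pyGet? p.1 1 else PySem.Str.pyGet? p.1 0) ∈ typeListA.map some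
instance (survey : List String) (choices : List Int) : Decidable (Pre_solution survey choices) := by
  unfold Pre_solution; infer_instance
def pvWitness_solution : List String × List Int := (["RT", "CF", "NA"], [1, 7, 5])

def Spec_solution (survey : List String) (choices : List Int) (out : String) : Prop := out = solution_alt survey choices
instance (survey : List String) (choices : List Int) (out : String) : Decidable (Spec_solution survey choices out) := by unfold Spec_solution; infer_instance

-- ===== CLAIM =====
def Claim_equal_solution : Prop := ∀ (survey : List String) (choices : List Int), Dom_solution survey choices → Pre_solution survey choices → Spec_solution survey choices (solution survey choices)

-- ===== LEMMAS AND PROOFS =====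

lemma netStepB_shift (pos neg : Char) (l : List (String × Int)) (a : Int) :
    l.foldl (netStepB pos neg) a = a + l.foldl (netStepB pos neg) 0 := by
  induction l generalizing a with
  | nil => simp
  | cons p l ih =>
      simp only [List.foldl_cons]
      rw [ih (netStepB pos neg a p), ih (netStepB pos neg 0 p)]
      simp only [netStepB]
      split_ifs <;> ring

-- one step: the dict-difference for an axis moves by exactly B's signed contribution
lemma step_diff (d : PySem.Dict Char Int) (p : String × Int) (pos neg : Char)
    (hq : (pos, neg) ∈ pvPairsB)
    (hp : (if p.2 ≥ 4 then PySem.Str.pyGet? p.1 1 else PySem.Str.pyGet? p.1 0) ∈ typeListA.map some) :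
    (solAStep d p).getD pos 0 - (solAStep d p).getD neg 0
      = d.getD pos 0 - d.getD neg 0 + netStepB pos neg 0 p := by
  obtain ⟨ch, hmem, hsel⟩ := List.mem_map.mp hp
  replace hsel := hsel.symm
  by_cases hc : p.2 ≥ 4
  · rw [if_pos hc] at hsel
    fin_cases hq <;> fin_cases hmem <;>
    · simp only [solAStep, netStepB, chosenB, if_pos hc]
      rw [hsel]
      simp [PySem.Dict.getD_modify]
      try omega
  · rw [if_neg hc] at hsel
    fin_cases hq <;> fin_cases hmem <;>
    · simp only [solAStep, netStepB, chosenB, if_neg hc]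
      rw [hsel]
      simp [PySem.Dict.getD_modify]
      try omega

lemma fold_diff (l : List (String × Int)) (d : PySem.Dict Char Int) (pos neg : Char)
    (hq : (pos, neg) ∈ pvPairsB)
    (hl : ∀ p ∈ l, (if p.2 ≥ 4 then PySem.Str.pyGet? p.1 1 else PySem.Str.pyGet? p.1 0) ∈ typeListA.map some) :
    (l.foldl solAStep d).getD pos 0 - (l.foldl solAStep d).getD neg 0
      = d.getD pos 0 - d.getD neg 0 + l.foldl (netStepB pos neg) 0 := by
  induction l generalizing d with
  | nil => simp
  | cons p l ih =>
      simp only [List.foldl_cons]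
      rw [ih _ (fun q hq' => hl q (List.mem_cons_of_mem p hq')),
        step_diff d p pos neg hq (hl p List.mem_cons_self),
        netStepB_shift pos neg l (netStepB pos neg 0 p)]
      ring

lemma fold_diff0 (l : List (String × Int)) (d : PySem.Dict Char Int) (pos neg : Char)
    (hq : (pos, neg) ∈ pvPairsB)
    (hl : ∀ p ∈ l, (if p.2 ≥ 4 then PySem.Str.pyGet? p.1 1 else PySem.Str.pyGet? p.1 0) ∈ typeListA.map some)
    (h0 : d.getD pos 0 - d.getD neg 0 = 0) :
    (l.foldl solAStep d).getD pos 0 - (l.foldl solAStep d).getD neg 0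
      = l.foldl (netStepB pos neg) 0 := by
  rw [fold_diff l d pos neg hq hl, h0, zero_add]

-- ===== VERDICT =====
set_option maxRecDepth 10000 in
theorem solution_spec : Claim_equal_solution := by
  intro survey choices _ hpre
  unfold Spec_solution solution solution_alt
  have hd := fun pos neg hq =>
    fun h0 => fold_diff0 (survey.zip choices)
      (typeListA.foldl (fun d x => d.insert x 0) PySem.Dict.empty) pos neg hq hpre h0
  have hR := hd 'R' 'T' (by decide) (by decide)
  have hC := hd 'C' 'F' (by decide) (by decide)
  have hJ := hd 'J' 'M' (by decide) (by decide)
  have hA := hd 'A' 'N' (by decide) (by decide)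
  have hr : PySem.List.pyRange 0 4 1 = [0, 1, 2, 3] := by decide
  rw [hr]
  simp only [pvPairsB, List.foldl_cons, List.foldl_nil,
    show ((PySem.List.pyGet? typeListA (2 * 0)).getD ' ' = 'R') from by decide,
    show ((PySem.List.pyGet? typeListA (2 * 0 + 1)).getD ' ' = 'T') from by decide,
    show ((PySem.List.pyGet? typeListA (2 * 1)).getD ' ' = 'C') from by decide,
    show ((PySem.List.pyGet? typeListA (2 * 1 + 1)).getD ' ' = 'F') from by decide,
    show ((PySem.List.pyGet? typeListA (2 * 2)).getD ' ' = 'J') from by decide,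
    show ((PySem.List.pyGet? typeListA (2 * 2 + 1)).getD ' ' = 'M') from by decide,
    show ((PySem.List.pyGet? typeListA (2 * 3)).getD ' ' = 'A') from by decide,
    show ((PySem.List.pyGet? typeListA (2 * 3 + 1)).getD ' ' = 'N') from by decide]
  split_ifs <;> first | rfl | omega
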